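-- pv_equiv track=rewrite | github.com/scieloorg/opac-airflow | airflow/dags/operations/docs_utils.py | group_pids
-- ===== SOURCE A (Python) =====
-- def group_pids(document_pids_list):
--     """
--     Agrupa os pid em journal, issue e documentos
--     Args:
--         document_pids_list (list of str): lista de pids v2
--     Returns:
--         dict: cuja chave é pid de journal, valor dict
--                 (chave: pid de issue, valor: lista de pid de documentos)
--     """
--     group = {}
--     for doc_pid_v2 in sorted(list(set(document_pids_list))):
--         issue_pid = doc_pid_v2[1:18]
--         journal_pid = issue_pid[:9]
--         group[journal_pid] = group.get(journal_pid, {})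
--         group[journal_pid][issue_pid] = group[journal_pid].get(issue_pid, [])
--         group[journal_pid][issue_pid].append(doc_pid_v2)
--     return group
-- ===== SOURCE B (Python) =====
-- def group_pids(document_pids_list):
--     """
--     Agrupa os pid em journal, issue e documentos (build-from-groups, no
--     incremental mutation): one nested dict comprehension over the sorted
--     unique pids, with journal/issue key lists deduplicated up front.
--     """
--     pids = sorted(set(document_pids_list))
--     return {
--         journal: {
--             issue: [p for p in pids if p[1:18] == issue]
--             for issue in dict.fromkeys(p[1:18] for p in pids if p[1:10] == journal)
--         }
--         for journal in dict.fromkeys(p[1:10] for p in pids)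
--     }
-- ===== Notes on version B (the rewrite author's own statement) =====
-- stated objective: alternative
-- what changed: B builds the nested result in one declarative nested dict comprehension from up-front deduplicated journal/issue key lists (a filter per issue collects its documents), instead of A's incremental get/append mutation of a dict of dicts while looping over the pids; B trades speed for this declarative build (it rescans the pid list per key, quadratic when keys are mostly distinct).
import Mathlib
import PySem

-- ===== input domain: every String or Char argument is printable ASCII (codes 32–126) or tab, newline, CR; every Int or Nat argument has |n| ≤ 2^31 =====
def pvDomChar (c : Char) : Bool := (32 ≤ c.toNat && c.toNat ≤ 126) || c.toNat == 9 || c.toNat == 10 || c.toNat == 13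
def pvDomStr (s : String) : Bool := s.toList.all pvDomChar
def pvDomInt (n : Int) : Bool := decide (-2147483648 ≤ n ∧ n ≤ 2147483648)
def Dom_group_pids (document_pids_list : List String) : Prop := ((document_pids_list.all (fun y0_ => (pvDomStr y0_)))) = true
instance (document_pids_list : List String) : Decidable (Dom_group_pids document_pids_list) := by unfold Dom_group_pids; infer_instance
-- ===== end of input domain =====

-- B replaces A's incremental dict mutation by a single nested dict comprehension built from
-- deduplicated journal/issue key lists (alternative decomposition; it rescans the pid list per
-- key, so it is slower than A on inputs with many distinct keys).

-- ===== PORT A =====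
def group_pids (document_pids_list : List String) : List (String × List (String × List String)) :=
  let group : PySem.Dict String (PySem.Dict String (List String)) :=
    (PySem.List.sorted (PySem.Set.ofList document_pids_list) (fun x => x) false).foldl
      (fun group doc_pid_v2 =>
        let issue_pid := PySem.Str.slice doc_pid_v2 (some 1) (some 18)
        let journal_pid := PySem.Str.slice issue_pid none (some 9)
        let group := group.insert journal_pid (group.getD journal_pid PySem.Dict.empty)
        let inner := group.getD journal_pid PySem.Dict.empty
        let group := group.insert journal_pid (inner.insert issue_pid (inner.getD issue_pid []))
        group.modify journal_pid PySem.Dict.empty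
          (fun d => d.modify issue_pid [] (fun l => l ++ [doc_pid_v2])))
      PySem.Dict.empty
  group.items.map (fun kv => (kv.1, kv.2.items))

-- ===== PORT B =====
def group_pids_alt (document_pids_list : List String) : List (String × List (String × List String)) :=
  let pids := PySem.List.sorted (PySem.Set.ofList document_pids_list) (fun x => x) false
  (PySem.List.dedup (pids.map (fun p => PySem.Str.slice p (some 1) (some 10)))).map
    (fun journal =>
      (journal,
        (PySem.List.dedup
            ((pids.filter (fun p => PySem.Str.slice p (some 1) (some 10) == journal)).map
              (fun p => PySem.Str.slice p (some 1) (some 18)))).map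
          (fun issue =>
            (issue, pids.filter (fun p => PySem.Str.slice p (some 1) (some 18) == issue)))))


-- ===== PRECONDITION & SPEC =====
def Spec_group_pids (document_pids_list : List String) (out : List (String × List (String × List String))) : Prop := out = group_pids_alt document_pids_list
instance (document_pids_list : List String) (out : List (String × List (String × List String))) : Decidable (Spec_group_pids document_pids_list out) := by unfold Spec_group_pids; infer_instance

-- ===== CLAIM (what is proved, stated in full; the proofs are below) =====
def Claim_equal_group_pids : Prop := ∀ (document_pids_list : List String), Dom_group_pids document_pids_list → Spec_group_pids document_pids_list (group_pids document_pids_list)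

-- ===== LEMMAS AND PROOFS =====

theorem pv_get?_mk_map {ν : Type} (l : List String) (f : String → ν) (j : String) :
    (PySem.Dict.mk (l.map fun k => (k, f k))).get? j = if j ∈ l then some (f j) else none := by
  induction l with
  | nil => simp [PySem.Dict.get?]
  | cons a l ih =>
    simp only [List.map_cons, PySem.Dict.get?_mk_cons, List.mem_cons]
    by_cases h : a = j
    · subst h; simp
    · simp [h, Ne.symm h, ← ih, PySem.Dict.get?]

theorem pv_getD_mk_map {ν : Type} (l : List String) (f : String → ν) (j : String) (d : ν) :
    (PySem.Dict.mk (l.map fun k => (k, f k))).getD j d = if j ∈ l then f j else d := by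
  simp [PySem.Dict.getD, pv_get?_mk_map]
  split <;> simp

theorem pv_contains_mk_map {ν : Type} (l : List String) (f : String → ν) (j : String) :
    (PySem.Dict.mk (l.map fun k => (k, f k))).contains j = decide (j ∈ l) := by
  rw [PySem.Dict.contains_eq_decide_mem_keys]
  simp [PySem.Dict.keys]

theorem pv_insert_mk_map_mem {ν : Type} (l : List String) (f : String → ν) (j : String) (v : ν)
    (hj : j ∈ l) :
    (PySem.Dict.mk (l.map fun k => (k, f k))).insert j v
      = PySem.Dict.mk (l.map fun k => (k, if k = j then v else f k)) := by
  rw [PySem.Dict.insert, pv_contains_mk_map]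
  simp only [hj, decide_true, if_pos, List.map_map]
  congr 1
  apply List.map_congr_left
  intro k _
  by_cases h : k = j
  · subst h; simp
  · simp [h]

theorem pv_insert_mk_map_not_mem {ν : Type} (l : List String) (f : String → ν) (j : String) (v : ν)
    (hj : j ∉ l) :
    (PySem.Dict.mk (l.map fun k => (k, f k))).insert j v
      = PySem.Dict.mk (l.map (fun k => (k, f k)) ++ [(j, v)]) := by
  rw [PySem.Dict.insert, pv_contains_mk_map]
  simp [hj]

theorem pv_dedup_append (l : List String) (x : String) :
    PySem.List.dedup (l ++ [x]) = PySem.List.dedup l ++ (if x ∈ l then [] else [x]) := by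
  have h1 : PySem.List.dedup (l ++ [x]) = PySem.Set.add (PySem.List.dedup l) x := by
    simp [PySem.List.dedup, PySem.Set.ofList_eq_foldl, List.foldl_append]
  rw [h1, PySem.Set.add]
  by_cases h : x ∈ l
  · simp [h, PySem.Set.contains]
  · simp [h, PySem.Set.contains]

def pvJk (p : String) : String := PySem.Str.slice p (some 1) (some 10)
def pvIk (p : String) : String := PySem.Str.slice p (some 1) (some 18)

theorem pvJk_eq (p : String) : PySem.Str.slice (pvIk p) none (some 9) = pvJk p := by
  simp [pvJk, pvIk, PySem.Str.slice, pysem, List.take_take]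

theorem pvJk_of_ik {p q : String} (h : pvIk p = pvIk q) : pvJk p = pvJk q := by
  rw [← pvJk_eq p, ← pvJk_eq q, h]

def pvJs (t : List String) : List String := PySem.List.dedup (t.map pvJk)
def pvIs (t : List String) (j : String) : List String :=
  PySem.List.dedup ((t.filter (fun p => pvJk p == j)).map pvIk)
def pvInner (t : List String) (j : String) : PySem.Dict String (List String) :=
  ⟨(pvIs t j).map (fun i => (i, t.filter (fun p => pvIk p == i)))⟩
def pvG (t : List String) : PySem.Dict String (PySem.Dict String (List String)) :=
  ⟨(pvJs t).map (fun j => (j, pvInner t j))⟩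

-- membership transfer facts
theorem pv_mem_Is_ik {t : List String} {j i : String} (hi : i ∈ pvIs t j) :
    ∃ q ∈ t, pvIk q = i ∧ pvJk q = j := by
  simp only [pvIs, PySem.List.mem_dedup, List.mem_map, List.mem_filter] at hi
  obtain ⟨q, ⟨hq, hqj⟩, hqi⟩ := hi
  exact ⟨q, hq, hqi, by simpa using hqj⟩

-- issue filters of other pids are untouched by appending p when the issue key differs from pvIk p
theorem pv_filter_ik_other {t : List String} {p i : String} (h : pvIk p ≠ i) :
    (t ++ [p]).filter (fun q => pvIk q == i) = t.filter (fun q => pvIk q == i) := by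
  simp [List.filter_append, h]

-- Sub-lemma A: journals other than pvJk p are unchanged
theorem pvInner_other {t : List String} {k : String} (p : String)
    (hne : k ≠ pvJk p) :
    pvInner (t ++ [p]) k = pvInner t k := by
  have hfilt : (t ++ [p]).filter (fun q => pvJk q == k) = t.filter (fun q => pvJk q == k) := by
    simp [List.filter_append, Ne.symm hne]
  have hIs : pvIs (t ++ [p]) k = pvIs t k := by
    simp [pvIs, hfilt]
  unfold pvInner
  rw [hIs]
  congr 1
  apply List.map_congr_left
  intro i hi
  have hne2 : pvIk p ≠ i := by
    intro he
    obtain ⟨q, _, hqi, hqj⟩ := pv_mem_Is_ik hi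
    exact hne ((hqj ▸ pvJk_of_ik (he ▸ hqi.symm) : pvJk p = k)).symm
  rw [pv_filter_ik_other hne2]

-- Sub-lemma B: the journal of p gains/extends the issue entry of pvIk p
theorem pvInner_same (t : List String) (p : String) :
    pvInner (t ++ [p]) (pvJk p)
      = (pvInner t (pvJk p)).insert (pvIk p)
          ((pvInner t (pvJk p)).getD (pvIk p) [] ++ [p]) := by
  set j := pvJk p with hj
  set i := pvIk p with hi
  have hfilt : (t ++ [p]).filter (fun q => pvJk q == j) = t.filter (fun q => pvJk q == j) ++ [p] := by
    simp [List.filter_append, hj]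
  have hIs : pvIs (t ++ [p]) j
      = pvIs t j ++ (if i ∈ (t.filter (fun q => pvJk q == j)).map pvIk then [] else [i]) := by
    rw [pvIs, hfilt, List.map_append, List.map_cons, List.map_nil, pv_dedup_append]
    rfl
  have hmemIs : i ∈ pvIs t j ↔ i ∈ (t.filter (fun q => pvJk q == j)).map pvIk := by
    simp [pvIs]
  by_cases hin : i ∈ (t.filter (fun q => pvJk q == j)).map pvIk
  · -- issue key already present: entry list gets p appended in place
    rw [pvInner, hIs, if_pos hin, List.append_nil]
    rw [pvInner, pv_insert_mk_map_mem _ _ _ _ (hmemIs.mpr hin)]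
    congr 1
    apply List.map_congr_left
    intro i' hi'
    by_cases h : i' = i
    · subst h
      rw [pv_getD_mk_map, if_pos (hmemIs.mpr hin)]
      simp [List.filter_append, hi]
    · simp only [if_neg h]
      rw [pv_filter_ik_other (by rw [← hi]; exact fun he => h he.symm)]
  · -- new issue key: appended at the end, and no earlier pid has this issue key
    have hempty : t.filter (fun q => pvIk q == i) = [] := by
      rw [List.filter_eq_nil_iff]
      intro q hq hqi
      apply hin
      have hqi' : pvIk q = i := by simpa using hqi
      have : pvJk q = j := hj ▸ pvJk_of_ik hqi'
      exact List.mem_map.mpr ⟨q, List.mem_filter.mpr ⟨hq, by simp [this]⟩, hqi'⟩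
    rw [pvInner, hIs, if_neg hin]
    rw [pvInner, pv_insert_mk_map_not_mem _ _ _ _ (fun h => hin (hmemIs.mp h))]
    rw [pv_getD_mk_map, if_neg (fun h => hin (hmemIs.mp h))]
    rw [List.map_append]
    congr 1
    refine congrArg₂ (fun (a b : List (String × List String)) => a ++ b) ?_ ?_
    · apply List.map_congr_left
      intro i' hi'
      have : i' ≠ i := fun h => hin (hmemIs.mp (h ▸ hi'))
      rw [pv_filter_ik_other (by rw [← hi]; exact fun he => this he.symm)]
    · simp [List.filter_append, hi]
      exact fun a ha => by simpa using List.filter_eq_nil_iff.mp hempty a ha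

def pvStep (group : PySem.Dict String (PySem.Dict String (List String))) (doc_pid_v2 : String) :
    PySem.Dict String (PySem.Dict String (List String)) :=
  let issue_pid := PySem.Str.slice doc_pid_v2 (some 1) (some 18)
  let journal_pid := PySem.Str.slice issue_pid none (some 9)
  let group := group.insert journal_pid (group.getD journal_pid PySem.Dict.empty)
  let inner := group.getD journal_pid PySem.Dict.empty
  let group := group.insert journal_pid (inner.insert issue_pid (inner.getD issue_pid []))
  group.modify journal_pid PySem.Dict.empty
    (fun d => d.modify issue_pid [] (fun l => l ++ [doc_pid_v2]))

theorem pvStep_eq (g : PySem.Dict String (PySem.Dict String (List String))) (p : String) :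
    pvStep g p
      = g.insert (pvJk p)
          ((g.getD (pvJk p) PySem.Dict.empty).insert (pvIk p)
            ((g.getD (pvJk p) PySem.Dict.empty).getD (pvIk p) [] ++ [p])) := by
  have pvIk_def : PySem.Str.slice p (some 1) (some 18) = pvIk p := rfl
  simp only [pvStep, pvIk_def, PySem.Dict.modify, PySem.Dict.getD_insert_self,
    PySem.Dict.insert_insert_self]
  rw [pvJk_eq]

theorem pvStep_G (t : List String) (p : String) : pvStep (pvG t) p = pvG (t ++ [p]) := by
  rw [pvStep_eq]
  have hget : (pvG t).getD (pvJk p) PySem.Dict.empty = pvInner t (pvJk p) := by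
    by_cases hj : pvJk p ∈ pvJs t
    · rw [pvG, pv_getD_mk_map, if_pos hj]
    · rw [pvG, pv_getD_mk_map, if_neg hj]
      have hfilt : t.filter (fun q => pvJk q == pvJk p) = [] := by
        rw [List.filter_eq_nil_iff]
        intro q hq hqj
        exact hj (by simp [pvJs]
                     exact ⟨q, hq, by simpa using hqj⟩)
      rw [pvInner, pvIs, hfilt]
      rfl
  rw [hget, ← pvInner_same]
  by_cases hj : pvJk p ∈ t.map pvJk
  · have hjJ : pvJk p ∈ pvJs t := by simpa [pvJs] using hj
    rw [pvG, pv_insert_mk_map_mem _ _ _ _ hjJ, pvG]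
    have hJs : pvJs (t ++ [p]) = pvJs t := by
      rw [pvJs, List.map_append, List.map_cons, List.map_nil, pv_dedup_append, if_pos hj,
        List.append_nil, pvJs]
    rw [hJs]
    congr 1
    apply List.map_congr_left
    intro k hk
    by_cases h : k = pvJk p
    · subst h; rw [if_pos rfl]
    · rw [if_neg h, pvInner_other p h]
  · have hjJ : pvJk p ∉ pvJs t := by simpa [pvJs] using hj
    rw [pvG, pv_insert_mk_map_not_mem _ _ _ _ hjJ, pvG]
    have hJs : pvJs (t ++ [p]) = pvJs t ++ [pvJk p] := by
      rw [pvJs, List.map_append, List.map_cons, List.map_nil, pv_dedup_append, if_neg hj, pvJs]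
    rw [hJs, List.map_append]
    congr 1
    refine congrArg₂ (fun (a b : List (String × PySem.Dict String (List String))) => a ++ b) ?_ (by simp)
    apply List.map_congr_left
    intro k hk
    have hk' : k ∈ t.map pvJk := by simpa [pvJs, PySem.List.mem_dedup] using hk
    have : k ≠ pvJk p := fun h => hj (h ▸ hk')
    rw [pvInner_other p this]

theorem pvFold_G (s t : List String) : s.foldl pvStep (pvG t) = pvG (t ++ s) := by
  induction s generalizing t with
  | nil => simp
  | cons x s ih =>
      rw [List.foldl_cons, pvStep_G, ih]
      simp

theorem pv_main (xs : List String) : group_pids xs = group_pids_alt xs := by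
  show (List.foldl pvStep (pvG [])
      (PySem.List.sorted (PySem.Set.ofList xs) (fun x => x) false)).items.map
      (fun kv => (kv.1, kv.2.items)) = group_pids_alt xs
  rw [pvFold_G, List.nil_append]
  simp only [pvG, List.map_map, group_pids_alt, pvInner, pvJs, pvIs, pvJk, pvIk]
  rfl

-- ===== VERDICT (by name: the statement is the Claim_ definition above) =====
theorem group_pids_spec : Claim_equal_group_pids := by
  intro xs _
  exact pv_main xs
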